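-- pv_equiv track=rewrite | github.com/icrphysics/RSStaticCodeChecker | RSStaticCodeChecker/static_code_checker/generated/argument_change_463.py | argumentsRight
-- ===== SOURCE A (Python) =====
-- def argumentsRight(d):
--     args = ["RoiName","GoalCriteria","GoalType","AcceptanceLevel","ParameterValue","IsComparativeGoal","Priority"]
--     too_many = []
--     for keyword in d.get("keywords", []):
--         if keyword.get("arg") in args:
--             args.remove(keyword.get("arg"))
--         else:
--             too_many.append(keyword.get("arg"))
--     if not too_many and not args:
--         return True
--     return (0 if too_many else 3)
-- ===== SOURCE B (Python) =====
-- def argumentsRight(d):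
--     required = ["RoiName","GoalCriteria","GoalType","AcceptanceLevel","ParameterValue","IsComparativeGoal","Priority"]
--     provided = [kw.get("arg") for kw in d.get("keywords", [])]
--     matched = {x for x in provided if x in required}
--     if len(provided) != len(matched):
--         return 0
--     if len(matched) != len(required):
--         return 3
--     return True
-- ===== Notes on version B (the rewrite author's own statement) =====
-- stated objective: simpler
-- what changed: Replaces A's destructive consume-loop (removing each seen name from the required list and accumulating extras) with a comprehension of provided values plus set-cardinality arithmetic: extras/duplicates show as len(provided) != len(matched), missing names as len(matched) != len(required).
import Mathlib
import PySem

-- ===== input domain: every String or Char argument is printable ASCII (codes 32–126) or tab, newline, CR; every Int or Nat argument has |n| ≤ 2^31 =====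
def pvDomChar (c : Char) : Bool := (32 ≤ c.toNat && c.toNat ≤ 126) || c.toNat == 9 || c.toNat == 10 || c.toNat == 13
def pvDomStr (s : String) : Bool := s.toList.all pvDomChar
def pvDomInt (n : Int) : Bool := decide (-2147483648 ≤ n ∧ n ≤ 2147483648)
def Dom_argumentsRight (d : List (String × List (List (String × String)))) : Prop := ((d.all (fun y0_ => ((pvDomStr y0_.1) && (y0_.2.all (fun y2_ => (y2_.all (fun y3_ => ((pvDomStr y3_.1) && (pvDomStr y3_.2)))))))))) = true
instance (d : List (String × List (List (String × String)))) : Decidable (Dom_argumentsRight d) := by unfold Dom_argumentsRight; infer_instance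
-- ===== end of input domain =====

-- B replaces A's destructive consume-loop over the required-name list by a comprehension plus
-- set-cardinality arithmetic (objective: simpler; same return value everywhere; True ports as 1).

-- ===== PORT A =====
-- the required argument names (Python's initial `args` list)
def pvReq : List String :=
  ["RoiName","GoalCriteria","GoalType","AcceptanceLevel","ParameterValue","IsComparativeGoal","Priority"]

-- one iteration of A's for-loop over the state (args, too_many); None is never in args
def pvStepA (st : List String × List (Option String)) (kw : List (String × String)) :
    List String × List (Option String) :=
  match List.lookup "arg" kw with
  | some s =>
      if st.1.contains s then
        ((PySem.List.remove? st.1 s).getD st.1, st.2)   -- args.remove(...): guarded by the if, remove? is `some` here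
      else
        (st.1, st.2 ++ [some s])
  | none => (st.1, st.2 ++ [none])

def argumentsRight (d : List (String × List (List (String × String)))) : Int :=
  let st := ((List.lookup "keywords" d).getD []).foldl pvStepA (pvReq, [])
  if st.2 = [] ∧ st.1 = [] then 1
  else if st.2 ≠ [] then 0 else 3

-- ===== PORT B =====
def argumentsRight_alt (d : List (String × List (List (String × String)))) : Int :=
  let required := ["RoiName","GoalCriteria","GoalType","AcceptanceLevel","ParameterValue","IsComparativeGoal","Priority"]
  let provided := ((List.lookup "keywords" d).getD []).map (fun kw => List.lookup "arg" kw)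
  let matched : PySem.Set (Option String) :=
    PySem.Set.ofList (provided.filter (fun x => match x with | some s => required.contains s | none => false))
  if provided.length ≠ matched.length then 0
  else if matched.length ≠ required.length then 3
  else 1

-- ===== PRECONDITION & SPEC =====
def Spec_argumentsRight (d : List (String × List (List (String × String)))) (out : Int) : Prop := out = argumentsRight_alt d
instance (d : List (String × List (List (String × String)))) (out : Int) : Decidable (Spec_argumentsRight d out) := by unfold Spec_argumentsRight; infer_instance

-- ===== CLAIM (what is proved, stated in full; the proofs are below) =====
def Claim_equal_argumentsRight : Prop := ∀ (d : List (String × List (List (String × String)))), Dom_argumentsRight d → Spec_argumentsRight d (argumentsRight d)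

-- ===== LEMMAS AND PROOFS =====

-- the per-keyword value A tests and B collects
def pvPr (kw : List (String × String)) : Option String := List.lookup "arg" kw

-- A's `args` after the loop: the names whose `some` never occurs among the provided values
theorem pvFoldA_fst (kws : List (List (String × String))) (args : List String)
    (tm : List (Option String)) (hnd : args.Nodup) :
    (kws.foldl pvStepA (args, tm)).1
      = args.filter (fun a => !((kws.map pvPr).contains (some a))) := by
  induction kws generalizing args tm with
  | nil => simp
  | cons kw kws ih =>
    simp only [List.foldl_cons, List.map_cons]
    rcases h : pvPr kw with _ | s <;> simp only [pvPr] at h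
    · have hrm : pvStepA (args, tm) kw = (args, tm ++ [none]) := by
        simp [pvStepA, h]
      rw [hrm, ih args _ hnd]
      apply List.filter_congr
      intro a _
      simp [pvPr]
    · by_cases hm : s ∈ args
      · have hrm : pvStepA (args, tm) kw = (args.erase s, tm) := by
          simp only [pvStepA, h]
          rw [PySem.List.remove?_eq_some_erase args s hm]
          simp only [List.contains_iff_mem, if_pos hm]
          rfl
        rw [hrm, ih _ _ (hnd.erase s)]
        rw [hnd.erase_eq_filter s, List.filter_filter]
        apply List.filter_congr
        intro a ha
        simp only [List.contains_cons]
        by_cases has : a = s <;> simp [has, bne, Bool.and_comm]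
      · have hrm : pvStepA (args, tm) kw = (args, tm ++ [some s]) := by
          simp only [pvStepA, h]
          simp only [List.contains_iff_mem, if_neg hm]
        rw [hrm, ih args _ hnd]
        apply List.filter_congr
        intro a ha
        have hne : a ≠ s := fun hh => hm (hh ▸ ha)
        simp [pvPr, hne]

-- length conservation: each step moves one provided value either out of `args` or into `too_many`
theorem pvFoldA_len (kws : List (List (String × String))) (args : List String)
    (tm : List (Option String)) (hnd : args.Nodup) :
    (kws.foldl pvStepA (args, tm)).2.length + args.length
      = tm.length + kws.length + (kws.foldl pvStepA (args, tm)).1.length := by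
  induction kws generalizing args tm with
  | nil => simp
  | cons kw kws ih =>
    simp only [List.foldl_cons, List.length_cons]
    rcases h : List.lookup "arg" kw with _ | s
    · have hrm : pvStepA (args, tm) kw = (args, tm ++ [none]) := by simp [pvStepA, h]
      rw [hrm]
      have := ih args (tm ++ [none]) hnd
      simp at this ⊢
      omega
    · by_cases hm : s ∈ args
      · have hrm : pvStepA (args, tm) kw = (args.erase s, tm) := by
          simp only [pvStepA, h]
          rw [PySem.List.remove?_eq_some_erase args s hm]
          simp only [List.contains_iff_mem, if_pos hm]
          rfl
        rw [hrm]
        have := ih (args.erase s) tm (hnd.erase s)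
        have hlen : (args.erase s).length + 1 = args.length := List.length_erase_add_one hm
        omega
      · have hrm : pvStepA (args, tm) kw = (args, tm ++ [some s]) := by
          simp only [pvStepA, h]
          simp only [List.contains_iff_mem, if_neg hm]
        rw [hrm]
        have := ih args (tm ++ [some s]) hnd
        simp at this ⊢
        omega

-- B's set of matched values is in bijection (via `some`) with the required names that were provided
theorem pvMatched_len (provided : List (Option String)) :
    (PySem.Set.ofList (provided.filter
        (fun x => match x with | some s => pvReq.contains s | none => false))).length
      = (pvReq.filter (fun a => provided.contains (some a))).length := by
  have h1 : (PySem.Set.ofList (provided.filter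
        (fun x => match x with | some s => pvReq.contains s | none => false))).Nodup :=
    PySem.Set.nodup_ofList _
  have h2 : ((pvReq.filter (fun a => provided.contains (some a))).map some).Nodup := by
    apply List.Nodup.map (fun _ _ => by simp)
    exact (by decide : pvReq.Nodup).filter _
  have hmem : ∀ x, x ∈ PySem.Set.ofList (provided.filter
        (fun x => match x with | some s => pvReq.contains s | none => false))
      ↔ x ∈ (pvReq.filter (fun a => provided.contains (some a))).map some := by
    intro x
    rw [PySem.Set.mem_ofList, List.mem_filter]
    rcases x with _ | s
    · simp
    · simp [List.mem_filter, and_comm]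
  have := ((List.perm_ext_iff_of_nodup h1 h2).mpr hmem).length_eq
  simpa using this

theorem pvMain (d : List (String × List (List (String × String)))) :
    argumentsRight d = argumentsRight_alt d := by
  unfold argumentsRight argumentsRight_alt
  rw [show (["RoiName","GoalCriteria","GoalType","AcceptanceLevel","ParameterValue","IsComparativeGoal","Priority"] : List String) = pvReq from rfl]
  set kws := (List.lookup "keywords" d).getD [] with hkws
  set st := kws.foldl pvStepA (pvReq, []) with hst
  set provided := kws.map (fun kw => List.lookup "arg" kw) with hprov
  have hprov' : provided = kws.map pvPr := rfl
  set matched := PySem.Set.ofList (provided.filter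
      (fun x => match x with | some s => pvReq.contains s | none => false)) with hmat
  have h1 : st.1 = pvReq.filter (fun a => !(provided.contains (some a))) := by
    rw [hst, hprov', pvFoldA_fst kws pvReq [] (by decide)]
  have h2 : st.2.length + pvReq.length = kws.length + st.1.length := by
    simpa using pvFoldA_len kws pvReq [] (by decide)
  have hm : List.length matched = (pvReq.filter (fun a => provided.contains (some a))).length :=
    pvMatched_len provided
  have hpart : (pvReq.filter (fun a => provided.contains (some a))).length
      + (pvReq.filter (fun a => !(provided.contains (some a)))).length = pvReq.length :=
    (List.length_eq_length_filter_add (l := pvReq) (fun a => provided.contains (some a))).symm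
  have hk : provided.length = kws.length := by simp [hprov]
  have hreq : pvReq.length = 7 := by decide
  have e1 : st.1.length + List.length matched = 7 := by rw [h1, hm] at *; omega
  have e2 : st.2.length + List.length matched = kws.length := by omega
  have hst2 : st.2 = [] ↔ st.2.length = 0 := by simp [List.length_eq_zero_iff]
  have hst1 : st.1 = [] ↔ st.1.length = 0 := by simp [List.length_eq_zero_iff]
  by_cases c1 : provided.length = List.length matched
  · by_cases c2 : List.length matched = 7
    · have hboth : st.2 = [] ∧ st.1 = [] := by rw [hst2, hst1]; omega
      rw [if_pos hboth, if_neg (not_not_intro c1), if_neg (fun h => h (by rw [hreq]; exact c2))]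
    · have hne : ¬(st.2 = [] ∧ st.1 = []) := by
        rw [hst2, hst1]; omega
      have h2e : st.2 = [] := by rw [hst2]; omega
      rw [if_neg hne, if_neg (not_not_intro h2e), if_neg (not_not_intro c1),
        if_pos (show List.length matched ≠ pvReq.length by rw [hreq]; exact c2)]
  · have h2ne : st.2 ≠ [] := by rw [Ne, hst2]; omega
    have hne : ¬(st.2 = [] ∧ st.1 = []) := fun h => h2ne h.1
    rw [if_neg hne, if_pos h2ne, if_pos (show provided.length ≠ List.length matched from c1)]

-- ===== VERDICT (by name: the statement is the Claim_ definition above) =====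
theorem argumentsRight_spec : Claim_equal_argumentsRight := by
  intro d _
  unfold Spec_argumentsRight
  exact pvMain d
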